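-- pv_equiv track=rewrite | github.com/WebValley2020ReImagined/labcheck | malterego82/exercises/dictionaries.py | denseMatrix
-- ===== SOURCE A (Python) =====
-- def denseMatrix(m: int, n: int):
--     toReturn = {}
--     counter = 0
--     for i in range(m):
--         for j in range(n):
--             toReturn[(i, j)] = counter
--             counter += 1
--     return toReturn
-- ===== SOURCE B (Python) =====
-- def denseMatrix(m: int, n: int):
--     rows, cols = max(m, 0), max(n, 0)
--     return {divmod(k, cols): k for k in range(rows * cols)}
-- ===== Notes on version B (the rewrite author's own statement) =====
-- stated objective: alternative
-- what changed: Inverts the mapping: instead of nested row/column loops driving a running counter, B runs a single flat loop over the counter values 0..rows*cols-1 and recovers each key's coordinates from the counter with divmod.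
import Mathlib
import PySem

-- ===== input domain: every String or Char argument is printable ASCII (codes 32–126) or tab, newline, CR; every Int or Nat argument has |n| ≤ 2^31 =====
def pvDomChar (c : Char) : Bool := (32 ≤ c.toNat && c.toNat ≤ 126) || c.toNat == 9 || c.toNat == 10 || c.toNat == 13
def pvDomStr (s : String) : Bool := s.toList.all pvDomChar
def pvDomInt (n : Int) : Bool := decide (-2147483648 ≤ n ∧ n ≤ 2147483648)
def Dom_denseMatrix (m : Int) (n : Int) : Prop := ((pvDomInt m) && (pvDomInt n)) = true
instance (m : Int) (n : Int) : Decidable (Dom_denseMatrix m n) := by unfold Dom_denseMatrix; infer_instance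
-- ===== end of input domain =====

-- B inverts A's mapping: one flat loop over the counter 0..rows*cols-1, recovering each key via divmod (objective: alternative).

-- ===== PORT A =====
-- dict keyed by the pair (i, j); the returned association list is flattened to triples per the type convention
def denseMatrix (m : Int) (n : Int) : List (Int × Int × Int) :=
  let st :=
    (PySem.List.pyRange 0 m 1).foldl
      (fun (st : PySem.Dict (Int × Int) Int × Int) i =>
        (PySem.List.pyRange 0 n 1).foldl
          (fun st j => (st.1.insert (i, j) st.2, st.2 + 1)) st)
      (PySem.Dict.empty, 0)
  st.1.items.map (fun p => (p.1.1, p.1.2, p.2))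

-- ===== PORT B =====
-- divmod(k, cols) ported as (floordiv, mod); in Source B it only runs for k in a nonempty
-- range, which forces cols > 0, so divmod never raises.
def denseMatrix_alt (m : Int) (n : Int) : List (Int × Int × Int) :=
  let rows := max m 0
  let cols := max n 0
  (PySem.List.pyRange 0 (rows * cols) 1).map
    (fun k => (PySem.Int.floordiv k cols, PySem.Int.mod k cols, k))

-- ===== PRECONDITION & SPEC =====
def Spec_denseMatrix (m : Int) (n : Int) (out : List (Int × Int × Int)) : Prop := out = denseMatrix_alt m n
instance (m : Int) (n : Int) (out : List (Int × Int × Int)) : Decidable (Spec_denseMatrix m n out) := by unfold Spec_denseMatrix; infer_instance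

-- ===== CLAIM (what is proved, stated in full; the proofs are below) =====
def Claim_equal_denseMatrix : Prop := ∀ (m : Int) (n : Int), Dom_denseMatrix m n → Spec_denseMatrix m n (denseMatrix m n)

-- ===== LEMMAS AND PROOFS =====

-- the inner row loop: inserts N fresh keys (i, 0..N-1) with values c, c+1, …
lemma pv_inner (N : Nat) (i : Int) (d : PySem.Dict (Int × Int) Int) (c : Int)
    (hf : ∀ j : Int, d.contains (i, j) = false) :
    ((List.range N).map (fun (k : Nat) => (k : Int))).foldl
        (fun (st : PySem.Dict (Int × Int) Int × Int) j => (st.1.insert (i, j) st.2, st.2 + 1))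
        (d, c)
      = (PySem.Dict.mk (d.items ++ (List.range N).map (fun (k : Nat) => ((i, (k : Int)), c + (k : Int)))),
         c + (N : Int)) := by
  rw [List.foldl_map]
  induction N with
  | zero => simp
  | succ N ih =>
    rw [List.range_succ, List.foldl_append, ih]
    simp only [List.foldl_cons, List.foldl_nil, List.map_append, List.map_cons, List.map_nil]
    have hfresh : (PySem.Dict.mk (d.items ++ (List.range N).map
        (fun (k : Nat) => ((i, (k : Int)), c + (k : Int))))).contains (i, (N : Int)) = false := by
      rw [PySem.Dict.contains_eq_decide_mem_keys]
      simp only [PySem.Dict.keys_mk, decide_eq_false_iff_not, List.map_append, List.mem_append,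
        List.map_map, List.mem_map, List.mem_range, Function.comp]
      rintro (hmem | ⟨b, hb, hp⟩)
      · have h0 := hf (N : Int)
        rw [PySem.Dict.contains_eq_decide_mem_keys] at h0
        simp only [decide_eq_false_iff_not] at h0
        exact h0 (by simpa [PySem.Dict.keys] using hmem)
      · have h2 : (b : Int) = (N : Int) := congrArg Prod.snd hp
        have h3 : b < N := hb
        omega
    apply Prod.ext
    · apply PySem.Dict.ext
      rw [PySem.Dict.items_insert_of_not_contains _ _ hfresh]
      simp [List.append_assoc]
    · simp only
      push_cast
      ring

-- the outer loop from the empty dict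
lemma pv_outer (M N : Nat) :
    (((List.range M).map (fun (k : Nat) => (k : Int))).foldl
        (fun (st : PySem.Dict (Int × Int) Int × Int) i =>
          ((List.range N).map (fun (k : Nat) => (k : Int))).foldl
            (fun st j => (st.1.insert (i, j) st.2, st.2 + 1)) st)
        (PySem.Dict.empty, 0))
      = (PySem.Dict.mk ((List.range M).flatMap (fun (a : Nat) =>
            (List.range N).map (fun (b : Nat) =>
              (((a : Int), (b : Int)), (a : Int) * (N : Int) + (b : Int))))),
         (M : Int) * (N : Int)) := by
  rw [List.foldl_map]
  induction M with
  | zero => simp [PySem.Dict.empty]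
  | succ M ih =>
    rw [List.range_succ, List.foldl_append, ih]
    simp only [List.foldl_cons, List.foldl_nil]
    rw [pv_inner N (M : Int) _ ((M : Int) * (N : Int)) ?_]
    · apply Prod.ext
      · apply PySem.Dict.ext
        simp only [List.flatMap_append, List.flatMap_cons, List.flatMap_nil, List.append_nil]
      · simp only
        push_cast
        ring
    · intro j
      rw [PySem.Dict.contains_eq_decide_mem_keys]
      simp only [PySem.Dict.keys_mk, decide_eq_false_iff_not, List.map_flatMap, List.mem_flatMap,
        List.mem_range, List.map_map, List.mem_map, Function.comp]
      rintro ⟨a, ha, b, hb, hp⟩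
      have h2 : (a : Int) = (M : Int) := congrArg Prod.fst hp
      have h3 : a < M := ha
      omega

-- B's single flat loop in Nat form equals the row-major flatMap form
lemma pv_flat (M N : Nat) :
    (List.range (M * N)).map
        (fun (k : Nat) => (((k / N : Nat) : Int), ((k % N : Nat) : Int), (k : Int)))
      = (List.range M).flatMap (fun (a : Nat) =>
          (List.range N).map (fun (b : Nat) =>
            ((a : Int), (b : Int), (a : Int) * (N : Int) + (b : Int)))) := by
  induction M with
  | zero => simp
  | succ M ih =>
    rw [Nat.succ_mul, List.range_add, List.map_append, ih, List.range_succ, List.flatMap_append]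
    congr 1
    simp only [List.map_map, List.flatMap_cons, List.flatMap_nil, List.append_nil]
    apply List.map_congr_left
    intro b hb
    have hb' : b < N := List.mem_range.mp hb
    have h1 : (M * N + b) / N = M := by
      rw [Nat.add_comm, Nat.add_mul_div_right _ _ (by omega : 0 < N), Nat.div_eq_of_lt hb', Nat.zero_add]
    have h2 : (M * N + b) % N = b := by
      rw [Nat.add_comm, Nat.add_mul_mod_self_right, Nat.mod_eq_of_lt hb']
    simp only [Function.comp, h1, h2]
    push_cast
    ring_nf

-- ===== VERDICT (by name: the statement is the Claim_ definition above) =====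
theorem denseMatrix_spec : Claim_equal_denseMatrix := by
  intro m n _
  unfold Spec_denseMatrix denseMatrix denseMatrix_alt
  simp only
  rw [PySem.List.pyRange_one, PySem.List.pyRange_one, PySem.List.pyRange_one]
  simp only [Int.sub_zero, zero_add]
  rw [pv_outer m.toNat n.toNat]
  have hm' : max m 0 = (m.toNat : Int) := by omega
  have hn' : max n 0 = (n.toNat : Int) := by omega
  rw [hm', hn', ← Nat.cast_mul, Int.toNat_natCast]
  simp only [List.map_flatMap, List.map_map, Function.comp_def]
  rw [← pv_flat m.toNat n.toNat]
  apply List.map_congr_left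
  intro k hk
  simp only [PySem.Int.floordiv_natCast, PySem.Int.mod_natCast]
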